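-- pv_equiv track=rewrite | github.com/truthless11/HRL-RE | code/AccCalc.py | find_tail
-- ===== SOURCE A (Python) =====
-- def find_tail(tags, num):
--     last = False
--     for i, x in enumerate(tags):
--         if x != num and last:
--             return i-1
--         if x == num+3:
--             last = True
--     return len(tags)-1 if last else -1
-- ===== SOURCE B (Python) =====
-- def find_tail(tags, num):
--     starts = [i for i, t in enumerate(tags) if t == num + 3]
--     if not starts:
--         return -1
--     s = starts[0]
--     stops = [j for j, t in enumerate(tags) if j > s and t != num]
--     return stops[0] - 1 if stops else len(tags) - 1
-- ===== Notes on version B (the rewrite author's own statement) =====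
-- stated objective: alternative
-- what changed: Replaces the stateful flag-scan with a declarative two-comprehension formulation: materialize the list of indices where num+3 occurs and the list of indices past the first such occurrence holding a tag != num, and read the answer off the heads of those lists (no flag, no early-return scan).
import Mathlib
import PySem

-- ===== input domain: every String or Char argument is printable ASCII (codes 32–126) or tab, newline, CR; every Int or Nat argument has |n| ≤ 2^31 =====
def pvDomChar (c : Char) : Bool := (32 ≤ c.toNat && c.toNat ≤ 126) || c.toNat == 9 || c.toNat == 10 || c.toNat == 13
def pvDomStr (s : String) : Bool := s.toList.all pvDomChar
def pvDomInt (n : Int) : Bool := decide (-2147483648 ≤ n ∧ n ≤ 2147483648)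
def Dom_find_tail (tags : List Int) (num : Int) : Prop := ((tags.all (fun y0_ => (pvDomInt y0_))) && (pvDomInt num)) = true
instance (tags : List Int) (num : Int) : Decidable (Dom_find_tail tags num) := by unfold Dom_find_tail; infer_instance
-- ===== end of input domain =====

-- B replaces A's stateful flag-scan by a declarative formulation: build the index lists
-- [i | tags[i] = num+3] and [j | j > first start, tags[j] ≠ num] and read the answer off their
-- heads. Equivalence proved on all inputs (both total); same asymptotic cost, no speed claim.

-- ===== PORT A =====
-- A's for-loop: state = (current index i, last); returns i-1 on 'x != num and last'
def findTailLoopA (num len : Int) : List Int → Int → Bool → Int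
  | [], _, last => if last then len - 1 else -1
  | x :: rest, i, last =>
    if x ≠ num ∧ last then i - 1
    else findTailLoopA num len rest (i + 1) (if x = num + 3 then true else last)

def find_tail (tags : List Int) (num : Int) : Int :=
  findTailLoopA num (tags.length : Int) tags 0 false

-- ===== PORT B =====
-- the two comprehensions of Source B, over enumerate(tags)
def find_tail_alt (tags : List Int) (num : Int) : Int :=
  let starts := ((PySem.List.enumerate tags).filter (fun p => decide (p.2 = num + 3))).map (·.1)
  match starts with
  | [] => -1
  | s :: _ =>
    let stops := ((PySem.List.enumerate tags).filter (fun p => decide (s < p.1 ∧ p.2 ≠ num))).map (·.1)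
    match stops with
    | [] => (tags.length : Int) - 1
    | j :: _ => j - 1

-- ===== PRECONDITION & SPEC =====
def Spec_find_tail (tags : List Int) (num : Int) (out : Int) : Prop := out = find_tail_alt tags num
instance (tags : List Int) (num : Int) (out : Int) : Decidable (Spec_find_tail tags num out) := by unfold Spec_find_tail; infer_instance

-- ===== CLAIM (what is proved, stated in full; the proofs are below) =====
def Claim_equal_find_tail : Prop := ∀ (tags : List Int) (num : Int), Dom_find_tail tags num → Spec_find_tail tags num (find_tail tags num)

-- ===== LEMMAS AND PROOFS =====

-- the 'starts' comprehension's head is the first occurrence of v, shifted by the enumeration offset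
theorem starts_head (num : Int) (l : List Int) (i : Int) :
    (((PySem.List.enumerate l i).filter (fun p => decide (p.2 = num + 3))).map (·.1)).head? =
      (PySem.List.index? l (num + 3)).map (fun k => i + (k : Int)) := by
  induction l generalizing i with
  | nil => simp [PySem.List.enumerate_nil]
  | cons x rest ih =>
    by_cases hx : x = num + 3
    · subst hx
      rw [PySem.List.index?_cons_self]
      simp [PySem.List.enumerate_cons]
    · rw [PySem.List.index?_cons_of_ne rest hx]
      rw [PySem.List.enumerate_cons, List.filter_cons]
      rw [if_neg (by simp [hx])]
      rw [ih (i + 1)]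
      cases h : PySem.List.index? rest (num + 3) with
      | none => simp
      | some k => simp; ring

-- a stretch of the list whose indices all lie at or below s contributes nothing to 'stops'
theorem stops_prefix_nil (num s : Int) (l : List Int) (i : Int) (h : i + (l.length : Int) ≤ s + 1) :
    (PySem.List.enumerate l i).filter (fun p => decide (s < p.1 ∧ p.2 ≠ num)) = [] := by
  induction l generalizing i with
  | nil => simp [PySem.List.enumerate_nil]
  | cons x rest ih =>
    rw [PySem.List.enumerate_cons, List.filter_cons]
    have hi : ¬ s < i := by simp at h; omega
    rw [if_neg (by simp [hi])]
    exact ih (i + 1) (by simp at h ⊢; omega)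
-- once 'last' is true, A's loop reads the head of the 'stops' comprehension
theorem loopA_true_eq_stops (num len s : Int) (l : List Int) (i : Int) (hi : s < i) :
    findTailLoopA num len l i true =
      match (((PySem.List.enumerate l i).filter (fun p => decide (s < p.1 ∧ p.2 ≠ num))).map (·.1)) with
      | [] => len - 1
      | j :: _ => j - 1 := by
  induction l generalizing i with
  | nil => simp [findTailLoopA, PySem.List.enumerate_nil]
  | cons x rest ih =>
    rw [PySem.List.enumerate_cons, List.filter_cons]
    by_cases hxn : x = num
    · rw [if_neg (by simp [hxn])]
      rw [← ih (i + 1) (by omega)]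
      simp [findTailLoopA, hxn]
    · rw [if_pos (by simp [hi, hxn])]
      simp [findTailLoopA, hxn]

-- while 'last' is false and no num+3 has been met, A's loop just advances the index
theorem loopA_false_prefix (num len : Int) (pre rest : List Int) (i : Int)
    (h : (num + 3) ∉ pre) :
    findTailLoopA num len (pre ++ rest) i false = findTailLoopA num len rest (i + (pre.length : Int)) false := by
  induction pre generalizing i with
  | nil => simp
  | cons x p ih =>
    simp only [List.mem_cons, not_or] at h
    rw [List.cons_append]
    show findTailLoopA num len (x :: (p ++ rest)) i false = _
    rw [show findTailLoopA num len (x :: (p ++ rest)) i false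
        = findTailLoopA num len (p ++ rest) (i + 1) (if x = num + 3 then true else false) from by
          simp [findTailLoopA]]
    rw [if_neg (fun he => h.1 he.symm), ih (i + 1) h.2]
    congr 1
    simp
    ring

-- ===== VERDICT (by name: the statement is the Claim_ definition above) =====
theorem find_tail_spec : Claim_equal_find_tail := by
  intro tags num _
  unfold Spec_find_tail find_tail find_tail_alt
  have hs := starts_head num tags 0
  cases hS : ((PySem.List.enumerate tags).filter (fun p => decide (p.2 = num + 3))).map (·.1) with
  | nil =>
    rw [hS] at hs
    cases hidx : PySem.List.index? tags (num + 3) with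
    | some k => rw [hidx] at hs; simp at hs
    | none =>
      simp only [hS]
      have hmem : (num + 3) ∉ tags := (PySem.List.index?_eq_none_iff tags (num+3)).1 hidx
      have hloop : ∀ (l : List Int) (i : Int), (num + 3) ∉ l →
          findTailLoopA num (tags.length : Int) l i false = -1 := by
        intro l
        induction l with
        | nil => intro i _; rfl
        | cons x r ih =>
          intro i h
          simp only [List.mem_cons, not_or] at h
          have hx : findTailLoopA num (tags.length : Int) (x :: r) i false
              = findTailLoopA num (tags.length : Int) r (i + 1) (if x = num + 3 then true else false) := by
            simp [findTailLoopA]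
          rw [hx, if_neg (fun he => h.1 he.symm)]
          exact ih (i + 1) h.2
      simpa using hloop tags 0 hmem
  | cons s tl =>
    rw [hS] at hs
    cases hidx : PySem.List.index? tags (num + 3) with
    | none => rw [hidx] at hs; simp at hs
    | some k =>
      rw [hidx] at hs
      have hsk : s = (k : Int) := by simpa using hs
      subst hsk
      obtain ⟨pre, suf, htags, hlen, hpre⟩ := (PySem.List.index?_eq_some_iff tags (num+3) k).1 hidx
      subst hlen
      simp only [hS]
      -- A side: skip the prefix, fire at num+3, then scan with last = true
      rw [show tags = pre ++ (num + 3) :: suf from htags]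
      rw [loopA_false_prefix num _ pre _ 0 hpre]
      have hstep : findTailLoopA num (((pre ++ (num+3) :: suf)).length : Int) ((num + 3) :: suf) (0 + (pre.length : Int)) false
          = findTailLoopA num (((pre ++ (num+3) :: suf)).length : Int) suf (0 + (pre.length : Int) + 1) true := by
        simp [findTailLoopA]
      rw [hstep]
      -- B side: split the stops filter over the same decomposition
      rw [PySem.List.enumerate_append, PySem.List.enumerate_cons, List.filter_append, List.filter_cons]
      rw [stops_prefix_nil num ((pre.length : Nat) : Int) pre 0 (by omega)]
      rw [if_neg (by simp)]
      rw [List.nil_append]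
      rw [loopA_true_eq_stops num _ ((pre.length : Nat) : Int) suf (0 + (pre.length : Int) + 1) (by omega)]
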